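-- pv_equiv track=rewrite | github.com/SunsetMkt/rar | rar/compressor.py | build_canonical_codes
-- ===== SOURCE A (Python) =====
-- def build_canonical_codes(lengths):
--     """Assign canonical Huffman codes from a lengths list.
--
--     Returns a dict {symbol: code_int}.  Symbols with length 0 are excluded.
--     """
--     syms = sorted((l, s) for s, l in enumerate(lengths) if l > 0)
--     code = 0
--     prev_len = 0
--     result = {}
--     for l, s in syms:
--         code <<= (l - prev_len)
--         result[s] = code
--         code += 1
--         prev_len = l
--     return result
-- ===== SOURCE B (Python) =====
-- def build_canonical_codes(lengths):
--     """Assign canonical Huffman codes from a lengths list.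
--
--     Bucket the symbols by code length (symbol order preserved inside a
--     bucket), then walk the distinct lengths in increasing order and hand
--     out consecutive codes per bucket, shifting once per length step.
--     """
--     buckets = {}
--     for s, l in enumerate(lengths):
--         if l > 0:
--             buckets.setdefault(l, []).append(s)
--     result = {}
--     code = 0
--     prev_len = 0
--     for l in sorted(buckets):
--         code <<= (l - prev_len)
--         for s in buckets[l]:
--             result[s] = code
--             code += 1
--         prev_len = l
--     return result
-- ===== Notes on version B (the rewrite author's own statement) =====
-- stated objective: alternative
-- what changed: replaces the O(n log n) sort of (length, symbol) pairs by bucketing symbols per length in a dict (symbol order preserved) and walking the sorted distinct lengths, shifting once per length group and handing out consecutive codes per bucket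
import Mathlib
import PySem

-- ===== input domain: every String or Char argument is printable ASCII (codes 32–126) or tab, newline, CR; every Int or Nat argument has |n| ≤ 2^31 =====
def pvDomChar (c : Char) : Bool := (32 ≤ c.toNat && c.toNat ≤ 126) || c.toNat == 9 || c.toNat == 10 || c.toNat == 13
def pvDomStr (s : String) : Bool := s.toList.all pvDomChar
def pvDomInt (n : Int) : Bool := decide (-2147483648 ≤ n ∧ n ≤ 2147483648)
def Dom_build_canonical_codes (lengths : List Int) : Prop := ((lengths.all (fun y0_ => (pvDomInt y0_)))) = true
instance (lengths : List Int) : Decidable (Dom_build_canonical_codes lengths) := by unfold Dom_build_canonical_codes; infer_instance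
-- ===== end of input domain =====

-- B buckets symbols per length in a dict and walks the sorted distinct lengths instead of
-- sorting all (length, symbol) pairs; same return value, proved below (objective: alternative).

-- ===== PORT A =====
-- A's loop state (code, prev_len, result); 'code <<= (l - prev_len)' is '<<< (…).toNat':
-- the shift amount is never negative since syms is sorted by length, so toNat is exact.
def build_canonical_codes (lengths : List Int) : List (Int × Int) :=
  let syms := PySem.List.sorted2
      (((PySem.List.enumerate lengths 0).filter (fun p => decide (0 < p.2))).map
        (fun p => (p.2, p.1)))
      (fun x => x.1) (fun x => x.2) false
  let st := syms.foldl
      (fun (st : Int × Int × PySem.Dict Int Int) p =>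
        let code := st.1 <<< (p.1 - st.2.1).toNat
        (code + 1, p.1, st.2.2.insert p.2 code))
      (0, 0, PySem.Dict.empty)
  st.2.2.items

-- ===== PORT B =====
-- 'buckets.setdefault(l, []).append(s)' is 'modify l [] (· ++ [s])' (append to existing or fresh []);
-- 'sorted(buckets)' iterates the keys; the shift amount is again never negative (keys increasing).
def build_canonical_codes_alt (lengths : List Int) : List (Int × Int) :=
  let buckets := (PySem.List.enumerate lengths 0).foldl
      (fun (d : PySem.Dict Int (List Int)) p =>
        if 0 < p.2 then d.modify p.2 [] (· ++ [p.1]) else d)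
      PySem.Dict.empty
  let st := (PySem.List.sorted buckets.keys (fun x => x) false).foldl
      (fun (st : Int × Int × PySem.Dict Int Int) l =>
        let code := st.1 <<< (l - st.2.1).toNat
        let q := (buckets.getD l []).foldl
            (fun (q : Int × PySem.Dict Int Int) s => (q.1 + 1, q.2.insert s q.1))
            (code, st.2.2)
        (q.1, l, q.2))
      (0, 0, PySem.Dict.empty)
  st.2.2.items

-- ===== PRECONDITION & SPEC =====
def Spec_build_canonical_codes (lengths : List Int) (out : List (Int × Int)) : Prop := out = build_canonical_codes_alt lengths
instance (lengths : List Int) (out : List (Int × Int)) : Decidable (Spec_build_canonical_codes lengths out) := by unfold Spec_build_canonical_codes; infer_instance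

-- ===== CLAIM (what is proved, stated in full; the proofs are below) =====
def Claim_equal_build_canonical_codes : Prop := ∀ (lengths : List Int), Dom_build_canonical_codes lengths → Spec_build_canonical_codes lengths (build_canonical_codes lengths)

-- ===== LEMMAS AND PROOFS =====

-- Proof-only helpers: named copies of the two fold bodies and of the intermediate data.
def pvP (lengths : List Int) : List (Int × Int) :=
  ((PySem.List.enumerate lengths 0).filter (fun p => decide (0 < p.2))).map (fun p => (p.2, p.1))

def pvBuckets (lengths : List Int) : PySem.Dict Int (List Int) :=
  (PySem.List.enumerate lengths 0).foldl
    (fun (d : PySem.Dict Int (List Int)) p =>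
      if 0 < p.2 then d.modify p.2 [] (· ++ [p.1]) else d)
    PySem.Dict.empty

def pvK (lengths : List Int) : List Int :=
  PySem.List.sorted (pvBuckets lengths).keys (fun x => x) false

def pvStepA (st : Int × Int × PySem.Dict Int Int) (p : Int × Int) : Int × Int × PySem.Dict Int Int :=
  let code := st.1 <<< (p.1 - st.2.1).toNat
  (code + 1, p.1, st.2.2.insert p.2 code)

def pvInner (q : Int × PySem.Dict Int Int) (s : Int) : Int × PySem.Dict Int Int :=
  (q.1 + 1, q.2.insert s q.1)

def pvStepB (B : Int → List Int) (st : Int × Int × PySem.Dict Int Int) (l : Int) :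
    Int × Int × PySem.Dict Int Int :=
  let code := st.1 <<< (l - st.2.1).toNat
  let q := (B l).foldl pvInner (code, st.2.2)
  (q.1, l, q.2)

theorem portA_eq (lengths : List Int) :
    build_canonical_codes lengths
      = ((PySem.List.sorted2 (pvP lengths) (fun x => x.1) (fun x => x.2) false).foldl
          pvStepA (0, 0, PySem.Dict.empty)).2.2.items := rfl

theorem portB_eq (lengths : List Int) :
    build_canonical_codes_alt lengths
      = ((pvK lengths).foldl (pvStepB (fun l => (pvBuckets lengths).getD l []))
          (0, 0, PySem.Dict.empty)).2.2.items := rfl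

theorem sorted2_eq_sorted_lex (xs : List (Int × Int)) :
    PySem.List.sorted2 xs (fun x => x.1) (fun x => x.2) false
      = PySem.List.sorted xs (fun x => (toLex (x.1, x.2) : Int ×ₗ Int)) false := by
  unfold PySem.List.sorted2 PySem.List.sorted
  have h : (fun (a b : Int × Int) => decide (a.1 < b.1) || !decide (b.1 < a.1) && decide (a.2 < b.2))
      = (fun (a b : Int × Int) => decide ((toLex (a.1, a.2) : Int ×ₗ Int) < toLex (b.1, b.2))) := by
    funext a b
    rcases lt_trichotomy a.1 b.1 with h1 | h1 | h1
    · simp [Prod.Lex.toLex_lt_toLex, h1, lt_asymm h1]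
    · simp [Prod.Lex.toLex_lt_toLex, h1]
    · simp [Prod.Lex.toLex_lt_toLex, lt_asymm h1, h1, h1.ne']
  simp [h]

theorem pvBuckets_eq_foldl_P (lengths : List Int) :
    pvBuckets lengths
      = (pvP lengths).foldl (fun d p => d.modify p.1 [] (· ++ [p.2])) PySem.Dict.empty := by
  unfold pvBuckets pvP
  rw [List.foldl_map, List.foldl_filter]
  simp only [decide_eq_true_eq]

theorem pvBuckets_getD (lengths : List Int) (l : Int) :
    (pvBuckets lengths).getD l []
      = ((pvP lengths).filter (fun p => p.1 == l)).map (·.2) := by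
  rw [pvBuckets_eq_foldl_P, PySem.Dict.getD_foldl_modify_append]
  simp

theorem pvBuckets_keys (lengths : List Int) :
    (pvBuckets lengths).keys = PySem.Set.ofList ((pvP lengths).map (·.1)) := by
  rw [pvBuckets_eq_foldl_P]
  have := PySem.Dict.keys_foldl_modify_key (pvP lengths) (fun p => p.1) []
    (fun _ p => (· ++ [p.2])) PySem.Dict.empty
  simpa [PySem.Set.update] using this

theorem pvK_pairwise (lengths : List Int) : (pvK lengths).Pairwise (· < ·) := by
  unfold pvK; rw [pvBuckets_keys]
  exact PySem.List.sorted_ofList_pairwise_lt _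

theorem pvK_mem (lengths : List Int) (l : Int) :
    l ∈ pvK lengths ↔ l ∈ (pvP lengths).map (·.1) := by
  unfold pvK
  rw [PySem.List.mem_sorted, pvBuckets_keys, PySem.Set.mem_ofList]

theorem perm_flatMap_filter (K : List Int) (P : List (Int × Int)) (hnd : K.Nodup)
    (hcov : ∀ p ∈ P, p.1 ∈ K) :
    (K.flatMap fun l => P.filter (fun p => p.1 == l)).Perm P := by
  induction K generalizing P with
  | nil =>
    have : P = [] := by
      cases P with
      | nil => rfl
      | cons a t => exact absurd (hcov a (by simp)) (by simp)
    simp [this]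
  | cons k K' ih =>
    rw [List.flatMap_cons]
    have hK' : ∀ l ∈ K', ∀ p ∈ P, (p.1 == l) = ((p.1 == l) && !(p.1 == k)) := by
      intro l hl p _
      by_cases h : p.1 = k
      · have : l ≠ k := fun he => (List.nodup_cons.mp hnd).1 (he ▸ hl)
        simp [h, this.symm]
      · simp [h]
    set P' := P.filter (fun p => !(p.1 == k)) with hP'
    have hrest : (K'.flatMap fun l => P.filter (fun p => p.1 == l))
        = K'.flatMap fun l => P'.filter (fun p => p.1 == l) := by
      unfold List.flatMap
      congr 1
      apply List.map_congr_left
      intro l hl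
      rw [hP', List.filter_filter]
      apply List.filter_congr
      intro p hp
      exact hK' l hl p hp
    rw [hrest]
    have hcov' : ∀ p ∈ P', p.1 ∈ K' := by
      intro p hp
      rw [hP', List.mem_filter] at hp
      have := hcov p hp.1
      simp only [List.mem_cons] at this
      rcases this with h | h
      · exact absurd (beq_iff_eq.mpr h) (by simpa using hp.2)
      · exact h
    have ih' := ih P' (List.nodup_cons.mp hnd).2 hcov'
    refine ((ih'.append_left (P.filter (fun p => p.1 == k))).trans ?_)
    exact List.filter_append_perm _ P

theorem pvP_pairwise_snd (lengths : List Int) :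
    (pvP lengths).Pairwise (fun p q => p.2 < q.2) := by
  unfold pvP
  rw [List.pairwise_map]
  exact (PySem.List.pairwise_lt_enumerate lengths 0).filter _

theorem pvFlat_eq_sorted2 (lengths : List Int) :
    PySem.List.sorted2 (pvP lengths) (fun x => x.1) (fun x => x.2) false
      = (pvK lengths).flatMap
          (fun l => ((pvBuckets lengths).getD l []).map (fun s => (l, s))) := by
  rw [sorted2_eq_sorted_lex]
  have hgrp : ∀ l, ((pvBuckets lengths).getD l []).map (fun s => (l, s))
      = (pvP lengths).filter (fun p => p.1 == l) := by
    intro l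
    rw [pvBuckets_getD, List.map_map]
    calc ((pvP lengths).filter (fun p => p.1 == l)).map ((fun s => (l, s)) ∘ (·.2))
        = ((pvP lengths).filter (fun p => p.1 == l)).map id := by
          apply List.map_congr_left
          intro p hp
          have : p.1 = l := by simpa using (List.mem_filter.mp hp).2
          simp [Function.comp, ← this]
      _ = _ := by simp
  have hnd : (pvK lengths).Nodup := (pvK_pairwise lengths).nodup
  have hcov : ∀ p ∈ pvP lengths, p.1 ∈ pvK lengths := by
    intro p hp
    rw [pvK_mem]
    exact List.mem_map_of_mem hp
  apply PySem.List.sorted_eq_of_perm_of_pairwise_lt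
  · have he : ((pvK lengths).flatMap fun l => ((pvBuckets lengths).getD l []).map (fun s => (l, s)))
        = (pvK lengths).flatMap fun l => (pvP lengths).filter (fun p => p.1 == l) := by
      simp only [hgrp]
    rw [he]
    exact perm_flatMap_filter _ _ hnd hcov
  · have hmem : ∀ (l : Int) (x : Int × Int),
        x ∈ ((pvBuckets lengths).getD l []).map (fun s => (l, s)) → x.1 = l := by
      intro l x hx
      obtain ⟨s, _, rfl⟩ := List.mem_map.mp hx
      rfl
    rw [List.flatMap, List.pairwise_flatten]
    constructor
    · intro g hg
      obtain ⟨l, _, rfl⟩ := List.mem_map.mp hg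
      rw [List.pairwise_map]
      have hb : ((pvBuckets lengths).getD l []).Pairwise (· < ·) := by
        rw [pvBuckets_getD, List.pairwise_map]
        exact (pvP_pairwise_snd lengths).filter _
      refine hb.imp ?_
      intro a b hab
      simp [Prod.Lex.toLex_lt_toLex, hab]
    · rw [List.pairwise_map]
      refine (pvK_pairwise lengths).imp ?_
      intro l1 l2 h12 x hx y hy
      have h1 := hmem l1 x hx
      have h2 := hmem l2 y hy
      simp [Prod.Lex.toLex_lt_toLex, h1, h2, h12]

theorem foldA_same_len (l : Int) (ss : List Int) (c : Int) (res : PySem.Dict Int Int) :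
    (ss.map (fun s => (l, s))).foldl pvStepA (c, l, res)
      = ((ss.foldl pvInner (c, res)).1, l, (ss.foldl pvInner (c, res)).2) := by
  induction ss generalizing c res with
  | nil => rfl
  | cons s t ih =>
    simp only [List.map_cons, List.foldl_cons]
    have hstep : pvStepA (c, l, res) (l, s) = (c + 1, l, res.insert s c) := by
      simp [pvStepA, Int.shiftLeft_zero]
    rw [hstep]
    exact ih (c + 1) (res.insert s c)

theorem foldA_group (l : Int) (ss : List Int) (hne : ss ≠ []) (st : Int × Int × PySem.Dict Int Int) :
    (ss.map (fun s => (l, s))).foldl pvStepA st = pvStepB (fun _ => ss) st l := by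
  obtain ⟨s0, rest, rfl⟩ := List.exists_cons_of_ne_nil hne
  show ((l, s0) :: rest.map (fun s => (l, s))).foldl pvStepA st = _
  rw [List.foldl_cons]
  have hstep : pvStepA st (l, s0)
      = (st.1 <<< (l - st.2.1).toNat + 1, l, st.2.2.insert s0 (st.1 <<< (l - st.2.1).toNat)) := rfl
  rw [hstep, foldA_same_len]
  rfl

theorem foldA_flat (K : List Int) (B : Int → List Int) (hne : ∀ l ∈ K, B l ≠ [])
    (st : Int × Int × PySem.Dict Int Int) :
    (K.flatMap fun l => (B l).map (fun s => (l, s))).foldl pvStepA st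
      = K.foldl (pvStepB B) st := by
  induction K generalizing st with
  | nil => rfl
  | cons k K' ih =>
    rw [List.flatMap_cons, List.foldl_append, List.foldl_cons]
    rw [foldA_group k (B k) (hne k (by simp)) st]
    have : pvStepB (fun _ => B k) st k = pvStepB B st k := rfl
    rw [this]
    exact ih (fun l hl => hne l (by simp [hl])) _

theorem pvBucket_ne_nil (lengths : List Int) (l : Int) (hl : l ∈ pvK lengths) :
    (pvBuckets lengths).getD l [] ≠ [] := by
  rw [pvBuckets_getD]
  rw [pvK_mem] at hl
  obtain ⟨p, hp, hpl⟩ := List.mem_map.mp hl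
  intro h
  have : p ∈ (pvP lengths).filter (fun p => p.1 == l) :=
    List.mem_filter.mpr ⟨hp, by simp [hpl]⟩
  rw [List.map_eq_nil_iff] at h
  rw [h] at this
  simp at this

-- ===== VERDICT (by name: the statement is the Claim_ definition above) =====
theorem build_canonical_codes_spec : Claim_equal_build_canonical_codes := by
  intro lengths _
  show build_canonical_codes lengths = build_canonical_codes_alt lengths
  rw [portA_eq, portB_eq, pvFlat_eq_sorted2,
    foldA_flat (pvK lengths) (fun l => (pvBuckets lengths).getD l [])
      (fun l hl => pvBucket_ne_nil lengths l hl) (0, 0, PySem.Dict.empty)]
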